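-- pv_equiv track=rewrite | github.com/Dyronix/py-asm-debugger | core/cheatsheet.py | _att_suffix_for_operands
-- ===== SOURCE A (Python) =====
-- from typing import Callable, Dict, Iterable, List, Optional
--
-- def _att_suffix_for_operands(operands: List[str]) -> str:
--     size_map = {"8": "b", "16": "w", "32": "l"}
--     sizes = []
--     for op in operands:
--         for bits in ("32", "16", "8"):
--             if op.endswith(bits):
--                 sizes.append(bits)
--                 break
--     if not sizes:
--         return ""
--     preferred = sizes[0]
--     for bits in sizes:
--         if bits == "32":
--             preferred = "32"
--             break
--         if bits == "16" and preferred != "32":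
--             preferred = "16"
--     return size_map.get(preferred, "")
-- ===== SOURCE B (Python) =====
-- def _att_suffix_for_operands(operands):
--     # Priority short-circuit: the result only depends on which suffixes occur at all.
--     # Suffix matches "32"/"16"/"8" are mutually exclusive, so the widest matching
--     # suffix anywhere decides the letter; no per-operand size list is built.
--     if any(op.endswith("32") for op in operands):
--         return "l"
--     if any(op.endswith("16") for op in operands):
--         return "w"
--     if any(op.endswith("8") for op in operands):
--         return "b"
--     return ""
-- ===== Notes on version B (the rewrite author's own statement) =====
-- stated objective: simpler
-- what changed: Drops A's per-operand sizes list and the upgrade/break selection loop entirely: B does staged any(endswith) passes in priority order 32>16>8 and returns the letter at the first hit, correct because the three suffix tests are mutually exclusive per operand.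
import Mathlib
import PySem

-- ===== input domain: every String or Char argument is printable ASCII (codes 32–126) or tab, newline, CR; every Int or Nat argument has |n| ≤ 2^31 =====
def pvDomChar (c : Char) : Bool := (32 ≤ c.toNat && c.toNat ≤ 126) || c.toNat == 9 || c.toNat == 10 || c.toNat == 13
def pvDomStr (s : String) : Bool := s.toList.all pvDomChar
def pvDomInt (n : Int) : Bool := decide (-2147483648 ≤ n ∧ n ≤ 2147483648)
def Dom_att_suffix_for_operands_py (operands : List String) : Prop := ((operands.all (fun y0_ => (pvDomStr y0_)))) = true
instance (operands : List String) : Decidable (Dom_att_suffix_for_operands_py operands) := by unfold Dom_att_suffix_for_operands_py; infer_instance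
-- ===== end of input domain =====

-- B drops A's sizes list and selection loop: staged any(endswith) passes in priority
-- order 32>16>8, returning the letter at the first hit (objective: simpler).

-- ===== PORT A =====
-- inner 'for bits in ("32","16","8"): if op.endswith(bits): sizes.append(bits); break'
def attA_sizesStep (sizes : List String) (op : String) : List String :=
  if PySem.Str.endswith op "32" then sizes ++ ["32"]
  else if PySem.Str.endswith op "16" then sizes ++ ["16"]
  else if PySem.Str.endswith op "8" then sizes ++ ["8"]
  else sizes

-- 'preferred = sizes[0]; for bits in sizes: …' with the break on "32"
def attA_preferred : List String → String → String
  | [], p => p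
  | b :: rest, p =>
    if b = "32" then "32"
    else attA_preferred rest (if b = "16" ∧ p ≠ "32" then "16" else p)

def att_suffix_for_operands_py (operands : List String) : String :=
  let size_map : PySem.Dict String String := PySem.Dict.ofList [("8", "b"), ("16", "w"), ("32", "l")]
  let sizes := operands.foldl attA_sizesStep []
  match sizes with
  | [] => ""
  | s0 :: _ => (PySem.Dict.get? size_map (attA_preferred sizes s0)).getD ""

-- ===== PORT B =====
def att_suffix_for_operands_py_alt (operands : List String) : String :=
  if operands.any (fun op => PySem.Str.endswith op "32") then "l"
  else if operands.any (fun op => PySem.Str.endswith op "16") then "w"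
  else if operands.any (fun op => PySem.Str.endswith op "8") then "b"
  else ""

-- ===== PRECONDITION & SPEC =====
def Spec_att_suffix_for_operands_py (operands : List String) (out : String) : Prop := out = att_suffix_for_operands_py_alt operands
instance (operands : List String) (out : String) : Decidable (Spec_att_suffix_for_operands_py operands out) := by unfold Spec_att_suffix_for_operands_py; infer_instance

-- ===== CLAIM (what is proved, stated in full; the proofs are below) =====
def Claim_equal_att_suffix_for_operands_py : Prop := ∀ (operands : List String), Dom_att_suffix_for_operands_py operands → Spec_att_suffix_for_operands_py operands (att_suffix_for_operands_py operands)

-- ===== LEMMAS AND PROOFS =====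

-- proof-side view of A's inner loop: the size appended for one operand, if any
def attMatch (op : String) : Option String :=
  if PySem.Str.endswith op "32" then some "32"
  else if PySem.Str.endswith op "16" then some "16"
  else if PySem.Str.endswith op "8" then some "8"
  else none

-- A's fold builds exactly the filterMap of attMatch
theorem attA_sizes_eq (operands : List String) (acc : List String) :
    operands.foldl attA_sizesStep acc = acc ++ operands.filterMap attMatch := by
  induction operands generalizing acc with
  | nil => simp
  | cons op rest ih =>
    simp only [List.foldl_cons, List.filterMap_cons, ih]
    unfold attA_sizesStep attMatch
    split_ifs <;> simp

theorem sizes_mem {operands : List String} {b : String}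
    (h : b ∈ operands.filterMap attMatch) : b = "32" ∨ b = "16" ∨ b = "8" := by
  rcases List.mem_filterMap.mp h with ⟨op, _, hop⟩
  unfold attMatch at hop
  split_ifs at hop
  · exact Or.inl (Option.some_injective _ hop).symm
  · exact Or.inr (Or.inl (Option.some_injective _ hop).symm)
  · exact Or.inr (Or.inr (Option.some_injective _ hop).symm)

theorem mem32_iff (operands : List String) :
    "32" ∈ operands.filterMap attMatch ↔
      operands.any (fun op => PySem.Str.endswith op "32") = true := by
  simp only [List.mem_filterMap, List.any_eq_true]
  constructor
  · rintro ⟨op, hm, hop⟩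
    unfold attMatch at hop
    split_ifs at hop with h1 h2 h3
    · exact ⟨op, hm, h1⟩
    · exact absurd (Option.some_injective _ hop) (by decide)
    · exact absurd (Option.some_injective _ hop) (by decide)
  · rintro ⟨op, hm, hop⟩
    exact ⟨op, hm, by unfold attMatch; rw [if_pos hop]⟩

-- when no operand ends with "32", "16" membership is plain any(endswith "16")
theorem mem16_iff (operands : List String)
    (h32 : operands.any (fun op => PySem.Str.endswith op "32") = false) :
    "16" ∈ operands.filterMap attMatch ↔
      operands.any (fun op => PySem.Str.endswith op "16") = true := by
  rw [List.any_eq_false] at h32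
  simp only [List.mem_filterMap, List.any_eq_true]
  constructor
  · rintro ⟨op, hm, hop⟩
    unfold attMatch at hop
    split_ifs at hop with h1 h2 h3
    · exact absurd (Option.some_injective _ hop) (by decide)
    · exact ⟨op, hm, h2⟩
    · exact absurd (Option.some_injective _ hop) (by decide)
  · rintro ⟨op, hm, hop⟩
    exact ⟨op, hm, by unfold attMatch; rw [if_neg (h32 op hm), if_pos hop]⟩

theorem sizes_nonempty_iff (operands : List String) :
    operands.filterMap attMatch ≠ [] ↔
      (operands.any (fun op => PySem.Str.endswith op "32") = true ∨
       operands.any (fun op => PySem.Str.endswith op "16") = true ∨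
       operands.any (fun op => PySem.Str.endswith op "8") = true) := by
  rw [← List.isEmpty_eq_false_iff, List.isEmpty_eq_false_iff_exists_mem]
  simp only [List.mem_filterMap, List.any_eq_true]
  constructor
  · rintro ⟨b, op, hm, hop⟩
    unfold attMatch at hop
    split_ifs at hop with h1 h2 h3
    · exact Or.inl ⟨op, hm, h1⟩
    · exact Or.inr (Or.inl ⟨op, hm, h2⟩)
    · exact Or.inr (Or.inr ⟨op, hm, h3⟩)
  · rintro (⟨op, hm, h⟩ | ⟨op, hm, h⟩ | ⟨op, hm, h⟩)
    · exact ⟨"32", op, hm, by unfold attMatch; rw [if_pos h]⟩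
    · by_cases h1 : PySem.Str.endswith op "32" = true
      · exact ⟨"32", op, hm, by unfold attMatch; rw [if_pos h1]⟩
      · exact ⟨"16", op, hm, by unfold attMatch; rw [if_neg h1, if_pos h]⟩
    · by_cases h1 : PySem.Str.endswith op "32" = true
      · exact ⟨"32", op, hm, by unfold attMatch; rw [if_pos h1]⟩
      · by_cases h2 : PySem.Str.endswith op "16" = true
        · exact ⟨"16", op, hm, by unfold attMatch; rw [if_neg h1, if_pos h2]⟩
        · exact ⟨"8", op, hm, by unfold attMatch; rw [if_neg h1, if_neg h2, if_pos h]⟩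

-- the upgrade/break loop computes the best size present (for a start value ≠ "32")
theorem attA_preferred_eq (sizes : List String) (p : String) (hp : p ≠ "32") :
    attA_preferred sizes p =
      if "32" ∈ sizes then "32" else if "16" ∈ sizes then "16" else p := by
  induction sizes generalizing p with
  | nil => simp [attA_preferred]
  | cons b rest ih =>
    unfold attA_preferred
    by_cases hb32 : b = "32"
    · simp [hb32]
    · have hp' : (if b = "16" ∧ p ≠ "32" then "16" else p) ≠ "32" := by
        split_ifs <;> simp_all
      rw [ih _ hp']
      by_cases hb16 : b = "16" <;>
        by_cases h32 : "32" ∈ rest <;>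
          by_cases h16 : "16" ∈ rest <;>
            simp [hb32, hb16, h32, h16, hp, eq_comm]

-- ===== VERDICT (by name: the statement is the Claim_ definition above) =====
theorem att_suffix_for_operands_py_spec : Claim_equal_att_suffix_for_operands_py := by
  intro operands _
  show att_suffix_for_operands_py operands = att_suffix_for_operands_py_alt operands
  unfold att_suffix_for_operands_py att_suffix_for_operands_py_alt
  rw [attA_sizes_eq]
  simp only [List.nil_append]
  cases hs : operands.filterMap attMatch with
  | nil =>
    have h32 : operands.any (fun op => PySem.Str.endswith op "32") = false :=
      Bool.eq_false_iff.mpr fun h => (sizes_nonempty_iff operands).mpr (Or.inl h) hs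
    have h16 : operands.any (fun op => PySem.Str.endswith op "16") = false :=
      Bool.eq_false_iff.mpr fun h => (sizes_nonempty_iff operands).mpr (Or.inr (Or.inl h)) hs
    have h8 : operands.any (fun op => PySem.Str.endswith op "8") = false :=
      Bool.eq_false_iff.mpr fun h => (sizes_nonempty_iff operands).mpr (Or.inr (Or.inr h)) hs
    rw [h32, h16, h8]
    rfl
  | cons s0 rest =>
    have hs0 : s0 = "32" ∨ s0 = "16" ∨ s0 = "8" :=
      sizes_mem (hs ▸ (List.mem_cons_self : s0 ∈ s0 :: rest))
    change ((PySem.Dict.ofList [("8", "b"), ("16", "w"), ("32", "l")]).get?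
        (attA_preferred (s0 :: rest) s0)).getD "" = _
    by_cases h32 : operands.any (fun op => PySem.Str.endswith op "32") = true
    · have hm32 : "32" ∈ s0 :: rest := by rw [← hs]; exact (mem32_iff operands).mpr h32
      have hpref : attA_preferred (s0 :: rest) s0 = "32" := by
        by_cases h0 : s0 = "32"
        · unfold attA_preferred; rw [if_pos h0]
        · rw [attA_preferred_eq _ _ h0, if_pos hm32]
      rw [hpref, h32]
      rfl
    · have h32' : operands.any (fun op => PySem.Str.endswith op "32") = false :=
        Bool.eq_false_iff.mpr h32
      have hm32 : "32" ∉ s0 :: rest := by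
        rw [← hs, mem32_iff]; exact fun h => h32 h
      have h0 : s0 ≠ "32" := fun h => hm32 (h ▸ List.mem_cons_self)
      by_cases h16 : operands.any (fun op => PySem.Str.endswith op "16") = true
      · have hm16 : "16" ∈ s0 :: rest := by
          rw [← hs]; exact (mem16_iff operands h32').mpr h16
        have hpref : attA_preferred (s0 :: rest) s0 = "16" := by
          rw [attA_preferred_eq _ _ h0, if_neg hm32, if_pos hm16]
        rw [hpref, h32', h16]
        rfl
      · have h16' : operands.any (fun op => PySem.Str.endswith op "16") = false :=
          Bool.eq_false_iff.mpr h16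
        have hm16 : "16" ∉ s0 :: rest := by
          rw [← hs, mem16_iff operands h32']; exact fun h => h16 h
        have h8 : s0 = "8" := by
          rcases hs0 with h | h | h
          · exact absurd (h ▸ (List.mem_cons_self : s0 ∈ s0 :: rest)) hm32
          · exact absurd (h ▸ (List.mem_cons_self : s0 ∈ s0 :: rest)) hm16
          · exact h
        have h8any : operands.any (fun op => PySem.Str.endswith op "8") = true := by
          rcases (sizes_nonempty_iff operands).mp (by rw [hs]; exact List.cons_ne_nil _ _) with h | h | h
          · exact absurd h h32
          · exact absurd h h16
          · exact h
        have hpref : attA_preferred (s0 :: rest) s0 = "8" := by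
          rw [attA_preferred_eq _ _ h0, if_neg hm32, if_neg hm16, h8]
        rw [hpref, h32', h16', h8any]
        rfl
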